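-- pv_equiv track=rewrite | github.com/saezlab/pypath | pypath/inputs_v2/parsers/phenol_explorer.py | _build_member_fields
-- ===== SOURCE A (Python) =====
-- MEMBER_DELIMITER = '||'
--
-- def _build_member_fields(compositions: list[dict], delimiter: str = MEMBER_DELIMITER) -> dict[str, str]:
--     """
--     Build delimited member fields from composition data.
--
--     IMPORTANT: We use '-' for empty values to preserve index alignment.
--     The Column._normalize_token in tabular_builder filters out '-' as empty.
--     """
--     EMPTY = '-'
--
--     if not compositions:
--         return {
--             'member_compound_id': '',
--             'member_compound_name': '',
--             'member_chebi': '',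
--             'member_pubchem': '',
--             'member_cas': '',
--             'member_smiles': '',
--             'member_formula': '',
--             'member_synonyms': '',
--             'member_compound_class': '',
--             'member_compound_subclass': '',
--             'member_molecular_weight': '',
--             'member_aglycones': '',
--             'member_mean': '',
--             'member_min': '',
--             'member_max': '',
--             'member_sd': '',
--             'member_units': '',
--             'member_n': '',
--             'member_N': '',
--             'member_experimental_method': '',
--             'member_pubmed': '',
--         }
--
--     def _v(val: str) -> str:
--         """Return value or placeholder if empty."""
--         return val if val else EMPTY
--
--     return {
--         'member_compound_id': delimiter.join(_v(c.get('compound_id', '')) for c in compositions),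
--         'member_compound_name': delimiter.join(_v(c.get('compound_name', '')) for c in compositions),
--         'member_chebi': delimiter.join(_v(c.get('chebi_id', '')) for c in compositions),
--         'member_pubchem': delimiter.join(_v(c.get('pubchem_compound_id', '')) for c in compositions),
--         'member_cas': delimiter.join(_v(c.get('cas_number', '')) for c in compositions),
--         'member_smiles': delimiter.join(_v(c.get('smiles', '')) for c in compositions),
--         'member_formula': delimiter.join(_v(c.get('formula', '')) for c in compositions),
--         'member_synonyms': delimiter.join(_v(c.get('synonyms', '')) for c in compositions),
--         'member_compound_class': delimiter.join(_v(c.get('compound_class', '')) for c in compositions),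
--         'member_compound_subclass': delimiter.join(_v(c.get('compound_subclass', '')) for c in compositions),
--         'member_molecular_weight': delimiter.join(_v(c.get('molecular_weight', '')) for c in compositions),
--         'member_aglycones': delimiter.join(_v(c.get('aglycones', '')) for c in compositions),
--         'member_mean': delimiter.join(_v(c.get('mean', '')) for c in compositions),
--         'member_min': delimiter.join(_v(c.get('min', '')) for c in compositions),
--         'member_max': delimiter.join(_v(c.get('max', '')) for c in compositions),
--         'member_sd': delimiter.join(_v(c.get('sd', '')) for c in compositions),
--         'member_units': delimiter.join(_v(c.get('units', '')) for c in compositions),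
--         'member_n': delimiter.join(_v(c.get('n', '')) for c in compositions),
--         'member_N': delimiter.join(_v(c.get('N', '')) for c in compositions),
--         'member_experimental_method': delimiter.join(_v(c.get('experimental_method', '')) for c in compositions),
--         'member_pubmed': delimiter.join(_v(c.get('pubmed_ids', '')) for c in compositions),
--     }
-- ===== SOURCE B (Python) =====
-- MEMBER_DELIMITER = '||'
--
-- _FIELD_TABLE = [
--     ('member_compound_id', 'compound_id'),
--     ('member_compound_name', 'compound_name'),
--     ('member_chebi', 'chebi_id'),
--     ('member_pubchem', 'pubchem_compound_id'),
--     ('member_cas', 'cas_number'),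
--     ('member_smiles', 'smiles'),
--     ('member_formula', 'formula'),
--     ('member_synonyms', 'synonyms'),
--     ('member_compound_class', 'compound_class'),
--     ('member_compound_subclass', 'compound_subclass'),
--     ('member_molecular_weight', 'molecular_weight'),
--     ('member_aglycones', 'aglycones'),
--     ('member_mean', 'mean'),
--     ('member_min', 'min'),
--     ('member_max', 'max'),
--     ('member_sd', 'sd'),
--     ('member_units', 'units'),
--     ('member_n', 'n'),
--     ('member_N', 'N'),
--     ('member_experimental_method', 'experimental_method'),
--     ('member_pubmed', 'pubmed_ids'),
-- ]
--
--
-- def _build_member_fields(compositions: list[dict], delimiter: str = MEMBER_DELIMITER) -> dict[str, str]: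
--     """Single pass over compositions; empty input needs no special case
--     since joining empty columns yields ''."""
--     cols = {field: [] for field, _ in _FIELD_TABLE}
--     for c in compositions:
--         for field, key in _FIELD_TABLE:
--             val = c.get(key, '')
--             cols[field].append(val if val else '-')
--     return {field: delimiter.join(cols[field]) for field, _ in _FIELD_TABLE}
-- ===== Notes on version B (the rewrite author's own statement) =====
-- stated objective: simpler
-- what changed: Replaces 21 separate generator scans of compositions (plus a special empty-input branch returning a 21-entry literal dict) with a single pass over compositions driven by a (field, key) table, accumulating per-field columns and joining them once; the empty case falls out of the same code.
import Mathlib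
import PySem

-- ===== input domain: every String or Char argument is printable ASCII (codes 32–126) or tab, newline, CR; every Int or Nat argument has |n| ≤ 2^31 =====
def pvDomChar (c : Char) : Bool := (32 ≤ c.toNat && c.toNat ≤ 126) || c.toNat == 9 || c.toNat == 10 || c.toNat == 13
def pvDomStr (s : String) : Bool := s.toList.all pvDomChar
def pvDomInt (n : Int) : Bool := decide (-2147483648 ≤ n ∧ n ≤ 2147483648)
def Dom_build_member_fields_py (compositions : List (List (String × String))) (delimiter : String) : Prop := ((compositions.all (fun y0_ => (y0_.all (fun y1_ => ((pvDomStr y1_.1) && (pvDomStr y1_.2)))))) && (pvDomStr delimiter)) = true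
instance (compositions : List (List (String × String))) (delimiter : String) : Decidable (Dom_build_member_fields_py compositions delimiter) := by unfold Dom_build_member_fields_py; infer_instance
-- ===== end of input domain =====

-- B replaces A's 21 separate scans of compositions (and the special empty-input branch)
-- with one table-driven pass accumulating per-field columns, joined once at the end.

-- ===== PORT A =====
-- dict.get(key, '') on an association list: first match, else ''
def pvGet (c : List (String × String)) (k : String) : String :=
  ((c.find? (fun p => p.1 == k)).map Prod.snd).getD ""

-- _v: 'val if val else EMPTY' ('' is the only falsy str)
def pvV (s : String) : String := if s = "" then "-" else s

def build_member_fields_py (compositions : List (List (String × String))) (delimiter : String) : List (String × String) :=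
  if compositions = [] then
    [("member_compound_id", ""), ("member_compound_name", ""), ("member_chebi", ""),
     ("member_pubchem", ""), ("member_cas", ""), ("member_smiles", ""),
     ("member_formula", ""), ("member_synonyms", ""), ("member_compound_class", ""),
     ("member_compound_subclass", ""), ("member_molecular_weight", ""), ("member_aglycones", ""),
     ("member_mean", ""), ("member_min", ""), ("member_max", ""), ("member_sd", ""),
     ("member_units", ""), ("member_n", ""), ("member_N", ""),
     ("member_experimental_method", ""), ("member_pubmed", "")]
  else
    [("member_compound_id", PySem.Str.join delimiter (compositions.map (fun c => pvV (pvGet c "compound_id")))),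
     ("member_compound_name", PySem.Str.join delimiter (compositions.map (fun c => pvV (pvGet c "compound_name")))),
     ("member_chebi", PySem.Str.join delimiter (compositions.map (fun c => pvV (pvGet c "chebi_id")))),
     ("member_pubchem", PySem.Str.join delimiter (compositions.map (fun c => pvV (pvGet c "pubchem_compound_id")))),
     ("member_cas", PySem.Str.join delimiter (compositions.map (fun c => pvV (pvGet c "cas_number")))),
     ("member_smiles", PySem.Str.join delimiter (compositions.map (fun c => pvV (pvGet c "smiles")))),
     ("member_formula", PySem.Str.join delimiter (compositions.map (fun c => pvV (pvGet c "formula")))),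
     ("member_synonyms", PySem.Str.join delimiter (compositions.map (fun c => pvV (pvGet c "synonyms")))),
     ("member_compound_class", PySem.Str.join delimiter (compositions.map (fun c => pvV (pvGet c "compound_class")))),
     ("member_compound_subclass", PySem.Str.join delimiter (compositions.map (fun c => pvV (pvGet c "compound_subclass")))),
     ("member_molecular_weight", PySem.Str.join delimiter (compositions.map (fun c => pvV (pvGet c "molecular_weight")))),
     ("member_aglycones", PySem.Str.join delimiter (compositions.map (fun c => pvV (pvGet c "aglycones")))),
     ("member_mean", PySem.Str.join delimiter (compositions.map (fun c => pvV (pvGet c "mean")))),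
     ("member_min", PySem.Str.join delimiter (compositions.map (fun c => pvV (pvGet c "min")))),
     ("member_max", PySem.Str.join delimiter (compositions.map (fun c => pvV (pvGet c "max")))),
     ("member_sd", PySem.Str.join delimiter (compositions.map (fun c => pvV (pvGet c "sd")))),
     ("member_units", PySem.Str.join delimiter (compositions.map (fun c => pvV (pvGet c "units")))),
     ("member_n", PySem.Str.join delimiter (compositions.map (fun c => pvV (pvGet c "n")))),
     ("member_N", PySem.Str.join delimiter (compositions.map (fun c => pvV (pvGet c "N")))),
     ("member_experimental_method", PySem.Str.join delimiter (compositions.map (fun c => pvV (pvGet c "experimental_method")))),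
     ("member_pubmed", PySem.Str.join delimiter (compositions.map (fun c => pvV (pvGet c "pubmed_ids"))))]

-- ===== PORT B =====
def pvTable : List (String × String) :=
  [("member_compound_id", "compound_id"), ("member_compound_name", "compound_name"),
   ("member_chebi", "chebi_id"), ("member_pubchem", "pubchem_compound_id"),
   ("member_cas", "cas_number"), ("member_smiles", "smiles"), ("member_formula", "formula"),
   ("member_synonyms", "synonyms"), ("member_compound_class", "compound_class"),
   ("member_compound_subclass", "compound_subclass"),
   ("member_molecular_weight", "molecular_weight"), ("member_aglycones", "aglycones"),
   ("member_mean", "mean"), ("member_min", "min"), ("member_max", "max"), ("member_sd", "sd"),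
   ("member_units", "units"), ("member_n", "n"), ("member_N", "N"),
   ("member_experimental_method", "experimental_method"), ("member_pubmed", "pubmed_ids")]

-- inner loop of B: append this composition's value to every field's column
def pvStep (c : List (String × String)) : List (String × String) → List (String × List String) → List (String × List String)
  | [], _ => []
  | _ :: _, [] => []
  | (f, k) :: t, (_, l) :: cols => (f, l ++ [pvV (pvGet c k)]) :: pvStep c t cols

def build_member_fields_py_alt (compositions : List (List (String × String))) (delimiter : String) : List (String × String) :=
  (compositions.foldl (fun cols c => pvStep c pvTable cols)
      (pvTable.map (fun fk => (fk.1, ([] : List String))))).map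
    (fun fl => (fl.1, PySem.Str.join delimiter fl.2))

-- ===== PRECONDITION & SPEC =====
def Spec_build_member_fields_py (compositions : List (List (String × String))) (delimiter : String) (out : List (String × String)) : Prop := out = build_member_fields_py_alt compositions delimiter
instance (compositions : List (List (String × String))) (delimiter : String) (out : List (String × String)) : Decidable (Spec_build_member_fields_py compositions delimiter out) := by unfold Spec_build_member_fields_py; infer_instance

-- ===== CLAIM (what is proved, stated in full; the proofs are below) =====
def Claim_equal_build_member_fields_py : Prop := ∀ (compositions : List (List (String × String))) (delimiter : String), Dom_build_member_fields_py compositions delimiter → Spec_build_member_fields_py compositions delimiter (build_member_fields_py compositions delimiter)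

-- ===== LEMMAS AND PROOFS =====
lemma pvStep_map (c : List (String × String)) (t : List (String × String))
    (g : String × String → List String) :
    pvStep c t (t.map (fun fk => (fk.1, g fk)))
      = t.map (fun fk => (fk.1, g fk ++ [pvV (pvGet c fk.2)])) := by
  induction t with
  | nil => rfl
  | cons fk t ih => cases fk; simp [pvStep, ih]

lemma pvFold_inv (cs : List (List (String × String))) (t : List (String × String))
    (g : String × String → List String) :
    cs.foldl (fun cols c => pvStep c t cols) (t.map (fun fk => (fk.1, g fk)))
      = t.map (fun fk => (fk.1, g fk ++ cs.map (fun c => pvV (pvGet c fk.2)))) := by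
  induction cs generalizing g with
  | nil => simp
  | cons c cs ih =>
    simp only [List.foldl_cons, pvStep_map]
    rw [ih (fun fk => g fk ++ [pvV (pvGet c fk.2)])]
    simp

-- ===== VERDICT (by name: the statement is the Claim_ definition above) =====
theorem build_member_fields_py_spec : Claim_equal_build_member_fields_py := by
  intro cs d _
  unfold Spec_build_member_fields_py build_member_fields_py_alt
  rw [pvFold_inv cs pvTable (fun _ => [])]
  cases cs with
  | nil => simp [build_member_fields_py, pvTable, PySem.Str.join]
  | cons c cs => simp [build_member_fields_py, pvTable]
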